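-- pv_equiv track=rewrite | github.com/Ridwan8500/CSE221-Fall23 | SOL/LAB03/TASK 04/task4.py | squaremax
-- ===== SOURCE A (Python) =====
-- def divide(arr):
--     if len(arr) > 1:
--         mid = len(arr) // 2
--         l = arr[:mid]
--         r = arr[mid:]
--
--         divide(l)
--         divide(r)
--
--         i = 0
--         j = 0
--         k = 0
--
--         while i < len(l) and j < len(r):
--             if l[i] < r[j]:
--                 arr[k] = l[i]
--                 i += 1
--             else:
--                 arr[k] = r[j]
--                 j += 1
--             k += 1
--
--         while i < len(l):
--             arr[k] = l[i]
--             i += 1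
--             k += 1
--
--         while j < len(r):
--             arr[k] = r[j]
--             j += 1
--             k += 1
--
--         return arr
--
--     else:
--       return arr
--
-- def squaremax(arr):
--     arr = divide(arr)
--     max = arr[len(arr)-1]
--     msumm = -99999
--     if arr[0] > 0:
--         for i in arr:
--             if i**2 + max > msumm:
--                 msumm = i**2 + max
--     else:
--         for i in arr:
--             if i < 0:
--                 if i**2 + max > msumm:
--                     msumm = i**2 + max
--                 if i + max**2 > msumm:
--                     msumm = i + max**2
--     return msumm
-- ===== SOURCE B (Python) =====
-- def squaremax(arr):
--     # O(n): no sort; the answer only depends on max, min and the largest negative.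
--     mx = max(arr)
--     mn = min(arr)
--     if mn > 0:
--         return mx * mx + mx
--     negs = [i for i in arr if i < 0]
--     if not negs:
--         return -99999
--     return max(mn * mn + mx, max(negs) + mx * mx)
-- ===== Notes on version B (the rewrite author's own statement) =====
-- stated objective: faster
-- what changed: Replaces the in-place merge sort + scan with a single pass over the unsorted array: the result is a closed-form pick from max, min and the largest negative element.
import Mathlib
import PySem

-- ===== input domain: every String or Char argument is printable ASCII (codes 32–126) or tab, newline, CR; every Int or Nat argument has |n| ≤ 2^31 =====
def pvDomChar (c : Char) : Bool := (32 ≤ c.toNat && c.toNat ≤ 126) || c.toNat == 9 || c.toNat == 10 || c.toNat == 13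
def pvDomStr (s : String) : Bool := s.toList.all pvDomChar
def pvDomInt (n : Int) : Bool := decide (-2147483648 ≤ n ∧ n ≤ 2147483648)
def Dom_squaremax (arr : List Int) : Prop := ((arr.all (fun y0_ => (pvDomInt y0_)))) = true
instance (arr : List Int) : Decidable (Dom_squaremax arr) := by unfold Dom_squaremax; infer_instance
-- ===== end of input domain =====

-- B replaces A's merge sort + scan by a closed-form O(n) pick from max, min and the
-- largest negative; A sorts its argument in place (B does not) — the equivalence
-- proved here is about the return value only.

-- ===== PORT A =====
-- the three while loops of Python's merge step (l[i] < r[j] takes from l, else from r)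
def mergeA : List Int → List Int → List Int
  | [], r => r
  | l, [] => l
  | a :: l, b :: r => if a < b then a :: mergeA l (b :: r) else b :: mergeA (a :: l) r
termination_by l r => l.length + r.length

-- Python's divide: in-place merge sort; ported functionally (l/r are arr[:mid]/arr[mid:])
def divide (arr : List Int) : List Int :=
  if _h : arr.length > 1 then
    let mid := arr.length / 2
    mergeA (divide (PySem.List.slice arr none (some (mid : Int))))
           (divide (PySem.List.slice arr (some (mid : Int)) none))
  else arr
termination_by arr.length
decreasing_by
· rw [PySem.List.slice_to_natCast]; simp; omega
· rw [PySem.List.slice_from_natCast]; simp; omega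

def squaremax (arr0 : List Int) : Int :=
  let arr := divide arr0
  let mx := PySem.List.pyGetD arr ((arr.length : Int) - 1) 0
  let msumm : Int := -99999
  if PySem.List.pyGetD arr 0 0 > 0 then
    arr.foldl (fun msumm i => if i ^ 2 + mx > msumm then i ^ 2 + mx else msumm) msumm
  else
    arr.foldl (fun msumm i =>
      if i < 0 then
        let m1 := if i ^ 2 + mx > msumm then i ^ 2 + mx else msumm
        if i + mx ^ 2 > m1 then i + mx ^ 2 else m1
      else msumm) msumm

-- ===== PORT B =====
def squaremax_alt (arr : List Int) : Int :=
  let mx := (PySem.List.max? arr (fun x => x)).getD 0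
  let mn := (PySem.List.min? arr (fun x => x)).getD 0
  if mn > 0 then mx * mx + mx
  else
    let negs := arr.filter (fun i => i < 0)
    if negs.isEmpty then -99999
    else max (mn * mn + mx) ((PySem.List.max? negs (fun x => x)).getD 0 + mx * mx)

-- ===== PRECONDITION & SPEC =====
-- A raises IndexError on the empty list (arr[-1]); B's max(arr) raises there too.
def Pre_squaremax (arr : List Int) : Prop := arr ≠ []
instance (arr : List Int) : Decidable (Pre_squaremax arr) := by unfold Pre_squaremax; infer_instance
def pvWitness_squaremax : List Int := ([-3, 1, 0, 2])

def Spec_squaremax (arr : List Int) (out : Int) : Prop := out = squaremax_alt arr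
instance (arr : List Int) (out : Int) : Decidable (Spec_squaremax arr out) := by unfold Spec_squaremax; infer_instance

-- ===== CLAIM (what is proved, stated in full; the proofs are below) =====
def Claim_equal_squaremax : Prop := ∀ (arr : List Int), Dom_squaremax arr → Pre_squaremax arr → Spec_squaremax arr (squaremax arr)

-- ===== LEMMAS AND PROOFS =====

lemma mergeA_perm : ∀ l r : List Int, (mergeA l r).Perm (l ++ r) := by
  intro l r
  fun_induction mergeA l r with
  | case1 r => simp
  | case2 l h => simp
  | case3 a l b r h ih => simpa using ih
  | case4 a l b r h ih => exact (ih.cons b).trans (List.perm_middle.symm)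

lemma mergeA_sorted : ∀ l r : List Int, l.Sorted (· ≤ ·) → r.Sorted (· ≤ ·) →
    (mergeA l r).Sorted (· ≤ ·) := by
  intro l r
  fun_induction mergeA l r with
  | case1 r => intro _ hr; exact hr
  | case2 l h => intro hl _; exact hl
  | case3 a l b r h ih =>
      intro hl hr
      rw [List.sorted_cons] at hl ⊢
      refine ⟨?_, ih hl.2 hr⟩
      intro y hy
      have hy' := (mergeA_perm l (b :: r)).mem_iff.mp hy
      simp only [List.mem_append, List.mem_cons] at hy'
      rcases hy' with hy' | hy' | hy'
      · exact hl.1 y hy'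
      · omega
      · have := (List.sorted_cons.mp hr).1 y hy'; omega
  | case4 a l b r h ih =>
      intro hl hr
      rw [List.sorted_cons] at hr ⊢
      refine ⟨?_, ih hl hr.2⟩
      intro y hy
      have hy' := (mergeA_perm (a :: l) r).mem_iff.mp hy
      simp only [List.mem_append, List.mem_cons] at hy'
      rcases hy' with (hy' | hy') | hy'
      · omega
      · have := (List.sorted_cons.mp hl).1 y hy'; omega
      · exact hr.1 y hy'

lemma divide_perm (arr : List Int) : (divide arr).Perm arr := by
  fun_induction divide arr with
  | case1 arr h mid ih1 ih2 =>
      have hm := mergeA_perm (divide (PySem.List.slice arr none (some (mid : Int))))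
        (divide (PySem.List.slice arr (some (mid : Int)) none))
      refine hm.trans ?_
      have := (ih1.append ih2)
      refine this.trans ?_
      rw [PySem.List.slice_to_natCast, PySem.List.slice_from_natCast]
      simp
  | case2 arr h => exact List.Perm.refl _

lemma divide_sorted (arr : List Int) : (divide arr).Sorted (· ≤ ·) := by
  fun_induction divide arr with
  | case1 arr h mid ih1 ih2 => exact mergeA_sorted _ _ ih1 ih2
  | case2 arr h =>
      cases arr with
      | nil => exact List.sorted_nil
      | cons a t =>
          cases t with
          | nil => exact List.sorted_singleton _ a
          | cons b t' => simp at h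

-- sorted-list extrema
lemma sorted_le_getLast : ∀ (s : List Int) (hs : s.Sorted (· ≤ ·)) (hne : s ≠ [])
    (y : Int), y ∈ s → y ≤ s.getLast hne := by
  intro s
  induction s with
  | nil => intro _ hne; exact absurd rfl hne
  | cons a t ih =>
      intro hs hne y hy
      rw [List.sorted_cons] at hs
      cases t with
      | nil => simp at hy; simp [hy, List.getLast]
      | cons b t' =>
          rw [List.getLast_cons (by simp)]
          rcases List.mem_cons.mp hy with rfl | hy'
          · exact le_trans (hs.1 b (by simp)) (ih hs.2 (by simp) b (by simp))
          · exact ih hs.2 (by simp) y hy'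

lemma sorted_head_le (a : Int) (t : List Int) (hs : (a :: t).Sorted (· ≤ ·))
    (y : Int) (hy : y ∈ a :: t) : a ≤ y := by
  rw [List.sorted_cons] at hs
  rcases List.mem_cons.mp hy with rfl | hy'
  · exact le_refl _
  · exact hs.1 y hy'

-- fold shape lemmas
lemma mstep_eq_max (m y : Int) : (if y > m then y else m) = max m y := by
  rcases le_or_gt y m with h | h
  · rw [if_neg (not_lt.mpr h), max_eq_left h]
  · rw [if_pos h, max_eq_right h.le]

lemma foldl_if_max (f : Int → Int) : ∀ (l : List Int) (c : Int),
    l.foldl (fun m i => if f i > m then f i else m) c = (l.map f).foldl max c := by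
  intro l
  induction l with
  | nil => intro c; rfl
  | cons a t ih =>
      intro c
      simp only [List.foldl_cons, List.map_cons]
      rw [ih]
      congr 1
      exact mstep_eq_max c (f a)

lemma foldl_neg_step (f g : Int → Int) : ∀ (l : List Int) (c : Int),
    l.foldl (fun m i =>
      if i < 0 then
        let m1 := if f i > m then f i else m
        if g i > m1 then g i else m1
      else m) c
    = ((l.filter (fun i => i < 0)).map (fun i => max (f i) (g i))).foldl max c := by
  intro l
  induction l with
  | nil => intro c; rfl
  | cons a t ih =>
      intro c
      rw [List.foldl_cons, ih, List.filter_cons]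
      by_cases ha : a < 0
      · rw [if_pos ha]
        simp only [ha, decide_true, if_true, List.map_cons, List.foldl_cons]
        congr 1
        show (if g a > (if f a > c then f a else c) then g a
              else (if f a > c then f a else c)) = max c (max (f a) (g a))
        rw [mstep_eq_max, mstep_eq_max, max_assoc]
      · rw [if_neg ha]
        simp [ha]

lemma foldl_max_ub : ∀ (l : List Int) (c : Int), (∀ y ∈ l, y ≤ c) → l.foldl max c = c := by
  intro l
  induction l with
  | nil => intro c _; rfl
  | cons a t ih =>
      intro c h
      simp only [List.foldl_cons]
      rw [max_eq_left (h a (by simp))]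
      exact ih c (fun y hy => h y (by simp [hy]))

lemma foldl_max_eq : ∀ (l : List Int) (c x : Int), x ∈ l → c ≤ x → (∀ y ∈ l, y ≤ x) →
    l.foldl max c = x := by
  intro l
  induction l with
  | nil => intro c x hx; simp at hx
  | cons a t ih =>
      intro c x hx hc hub
      simp only [List.foldl_cons]
      rcases List.mem_cons.mp hx with rfl | hx'
      · rw [max_eq_right hc]
        exact foldl_max_ub t x (fun y hy => hub y (by simp [hy]))
      · exact ih (max c a) x hx' (max_le hc (hub a (by simp))) (fun y hy => hub y (by simp [hy]))

-- ===== VERDICT (by name: the statement is the Claim_ definition above) =====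
theorem squaremax_spec : Claim_equal_squaremax := by
  intro arr _hdom hne
  unfold Spec_squaremax squaremax squaremax_alt
  have hperm := divide_perm arr
  have hsorted := divide_sorted arr
  cases hdiv : divide arr with
  | nil => exact absurd ((hdiv ▸ hperm).symm.eq_nil) hne
  | cons a t =>
  rw [hdiv] at hperm hsorted
  dsimp only
  set M := (a :: t).getLast (by simp) with hM_def
  have hMmem : M ∈ a :: t := List.getLast_mem _
  have hMub : ∀ y ∈ a :: t, y ≤ M := sorted_le_getLast _ hsorted (by simp)
  have hmlb : ∀ y ∈ a :: t, a ≤ y := sorted_head_le a t hsorted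
  -- A's index expressions
  have hmx : PySem.List.pyGetD (a :: t) (((a :: t).length : Int) - 1) 0 = M := by
    have h1 : (((a :: t).length : Int) - 1) = (((a :: t).length - 1 : Nat) : Int) := by
      simp only [List.length_cons]; omega
    rw [h1, PySem.List.pyGetD_natCast, List.getD_eq_getElem _ _ (by simp),
        hM_def, List.getLast_eq_getElem]
    rfl
  have hm0 : PySem.List.pyGetD (a :: t) 0 0 = a := PySem.List.pyGetD_zero_cons ..
  -- B's max? / min? equal M / a
  obtain ⟨M', hM'⟩ : ∃ m, PySem.List.max? arr (fun x => x) = some m := by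
    cases h : PySem.List.max? arr (fun x => x) with
    | none => exact absurd ((PySem.List.max?_eq_none_iff _ _).mp h) hne
    | some m => exact ⟨m, rfl⟩
  have hM'M : M' = M := by
    have h1 : M' ∈ arr := PySem.List.max?_mem hM'
    have h2 : ∀ y ∈ arr, y ≤ M' := fun y hy => PySem.List.max?_isMax hM' y hy
    have h3 : M' ≤ M := hMub M' (hperm.mem_iff.mpr h1)
    have h4 : M ≤ M' := h2 M (hperm.mem_iff.mp hMmem)
    omega
  obtain ⟨m', hm'⟩ : ∃ m, PySem.List.min? arr (fun x => x) = some m := by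
    cases h : PySem.List.min? arr (fun x => x) with
    | none => exact absurd ((PySem.List.min?_eq_none_iff _ _).mp h) hne
    | some m => exact ⟨m, rfl⟩
  have hm'a : m' = a := by
    have h1 : m' ∈ arr := PySem.List.min?_mem hm'
    have h2 : ∀ y ∈ arr, m' ≤ y := fun y hy => PySem.List.min?_isMin hm' y hy
    have h3 : a ≤ m' := hmlb m' (hperm.mem_iff.mpr h1)
    have h4 : m' ≤ a := h2 a (hperm.mem_iff.mp (by simp))
    omega
  simp only [hmx, hm0, hM', hm', Option.getD_some, hM'M, hm'a]
  by_cases hpos : a > 0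
  · -- all elements positive: both sides are M^2 + M
    rw [if_pos hpos, if_pos hpos, foldl_if_max]
    have hM1 : 1 ≤ M := le_trans (by omega) (hMub a (by simp))
    have hmem : M ^ 2 + M ∈ (a :: t).map (fun i => i ^ 2 + M) :=
      List.mem_map.mpr ⟨M, hMmem, rfl⟩
    have hub : ∀ y ∈ (a :: t).map (fun i => i ^ 2 + M), y ≤ M ^ 2 + M := by
      intro y hy
      obtain ⟨i, hi, rfl⟩ := List.mem_map.mp hy
      have h1 : i ≤ M := hMub i hi
      have h2 : 0 < i := lt_of_lt_of_le hpos (hmlb i hi)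
      nlinarith
    rw [foldl_max_eq ((a :: t).map (fun i => i ^ 2 + M)) (-99999) (M ^ 2 + M) hmem
      (by nlinarith) hub]
    ring
  · rw [if_neg hpos, if_neg hpos, foldl_neg_step]
    have hfilter : ((a :: t).filter (fun i => i < 0)).Perm (arr.filter (fun i => i < 0)) :=
      hperm.filter _
    by_cases hnegs : arr.filter (fun i => i < 0) = []
    · -- no negative elements: both sides are the sentinel -99999
      have h0 : (a :: t).filter (fun i => i < 0) = [] := by
        rw [← List.length_eq_zero_iff, hfilter.length_eq, hnegs]; rfl
      simp [h0, hnegs]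
    · -- negatives exist
      simp only [List.isEmpty_iff]
      rw [if_neg hnegs]
      obtain ⟨L, hL⟩ : ∃ m, PySem.List.max? (arr.filter (fun i => i < 0)) (fun x => x) = some m := by
        cases h : PySem.List.max? (arr.filter (fun i => i < 0)) (fun x => x) with
        | none => exact absurd ((PySem.List.max?_eq_none_iff _ _).mp h) hnegs
        | some m => exact ⟨m, rfl⟩
      rw [hL, Option.getD_some]
      have hLmem : L ∈ arr.filter (fun i => i < 0) := PySem.List.max?_mem hL
      have hLneg : L < 0 := by simpa using (List.mem_filter.mp hLmem).2
      have hLarr : L ∈ arr := (List.mem_filter.mp hLmem).1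
      have hLub : ∀ y ∈ arr.filter (fun i => i < 0), y ≤ L :=
        fun y hy => PySem.List.max?_isMax hL y hy
      have haL : a ≤ L := hmlb L (hperm.mem_iff.mpr hLarr)
      have haneg : a < 0 := by omega
      have hamem : a ∈ (a :: t).filter (fun i => i < 0) :=
        List.mem_filter.mpr ⟨by simp, by simpa using haneg⟩
      have haM : a ≤ M := hMub a (by simp)
      have e1 : a * a = a ^ 2 := by ring
      have e2 : M * M = M ^ 2 := by ring
      have hub : ∀ y ∈ ((a :: t).filter (fun i => i < 0)).map
          (fun i => max (i ^ 2 + M) (i + M ^ 2)), y ≤ max (a * a + M) (L + M * M) := by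
        intro y hy
        obtain ⟨i, hi, rfl⟩ := List.mem_map.mp hy
        have h1 : i < 0 := by simpa using (List.mem_filter.mp hi).2
        have h2 : a ≤ i := hmlb i (List.mem_filter.mp hi).1
        have h3 : i ≤ L := hLub i (List.mem_filter.mpr
          ⟨hperm.mem_iff.mp (List.mem_filter.mp hi).1, by simpa using h1⟩)
        have hsq : i ^ 2 ≤ a ^ 2 := by nlinarith
        rw [e1, e2]
        exact max_le_max (by omega) (by omega)
      have hmem : max (a * a + M) (L + M * M) ∈ ((a :: t).filter (fun i => i < 0)).map
          (fun i => max (i ^ 2 + M) (i + M ^ 2)) := by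
        rw [e1, e2]
        rcases le_or_gt (L + M ^ 2) (a ^ 2 + M) with hcase | hcase
        · refine List.mem_map.mpr ⟨a, hamem, ?_⟩
          rw [max_eq_left (show a + M ^ 2 ≤ a ^ 2 + M by omega),
              max_eq_left (show L + M ^ 2 ≤ a ^ 2 + M from hcase)]
        · have hLmem' : L ∈ (a :: t).filter (fun i => i < 0) :=
            List.mem_filter.mpr ⟨hperm.mem_iff.mpr hLarr, by simpa using hLneg⟩
          refine List.mem_map.mpr ⟨L, hLmem', ?_⟩
          have hfL : L ^ 2 ≤ a ^ 2 := by nlinarith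
          rw [max_eq_right (show L ^ 2 + M ≤ L + M ^ 2 by omega),
              max_eq_right (show a ^ 2 + M ≤ L + M ^ 2 by omega)]
      have hc : (-99999 : Int) ≤ max (a * a + M) (L + M * M) := by
        have h0 : 0 ≤ a ^ 2 + M := by nlinarith
        nlinarith [le_max_left (a * a + M) (L + M * M)]
      rw [foldl_max_eq (((a :: t).filter (fun i => i < 0)).map
        (fun i => max (i ^ 2 + M) (i + M ^ 2))) (-99999) (max (a * a + M) (L + M * M))
        hmem hc hub]
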